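-- pv_equiv track=rewrite | github.com/bubbafett5611/Bubba_Nodes | src/bubba_nodes/utils/prompt_analysis.py | find_duplicate_prompt_tokens
-- ===== SOURCE A (Python) =====
-- def find_duplicate_prompt_tokens(parts: list[str]) -> list[str]:
--     seen: set[str] = set()
--     duplicates: list[str] = []
--     dup_seen: set[str] = set()
--     for part in parts:
--         key = part.lower()
--         if key in seen and key not in dup_seen:
--             duplicates.append(part)
--             dup_seen.add(key)
--             continue
--         seen.add(key)
--     return duplicates
-- ===== SOURCE B (Python) =====
-- def find_duplicate_prompt_tokens(parts: list[str]) -> list[str]: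
--     keys = [p.lower() for p in parts]
--     before = []          # before[i] = occurrences of keys[i] among keys[:i]
--     counts = {}
--     for k in keys:
--         before.append(counts.get(k, 0))
--         counts[k] = counts.get(k, 0) + 1
--     return [p for p, c in zip(parts, before) if c == 1]
-- ===== Notes on version B (the rewrite author's own statement) =====
-- stated objective: alternative
-- what changed: Replaces A's streaming two-set scan (seen/dup_seen with conditional append) by a two-phase count-then-select pass: one counter loop records for each position how often its lowercased token occurred earlier, then a zip comprehension keeps the tokens with exactly one earlier occurrence.
import Mathlib
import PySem

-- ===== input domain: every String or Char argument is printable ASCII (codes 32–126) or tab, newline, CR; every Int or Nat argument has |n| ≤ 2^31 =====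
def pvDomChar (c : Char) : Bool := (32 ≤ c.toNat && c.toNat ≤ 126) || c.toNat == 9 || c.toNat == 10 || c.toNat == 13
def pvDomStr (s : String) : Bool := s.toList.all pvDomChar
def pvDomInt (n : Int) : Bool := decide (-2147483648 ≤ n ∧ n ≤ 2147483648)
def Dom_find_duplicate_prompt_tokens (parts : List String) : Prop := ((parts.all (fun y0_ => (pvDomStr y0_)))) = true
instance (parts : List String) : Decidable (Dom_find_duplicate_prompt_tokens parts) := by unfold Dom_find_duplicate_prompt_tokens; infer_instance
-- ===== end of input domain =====

-- B replaces A's streaming two-set scan by a two-phase count-then-select pass: one counter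
-- loop records how often each token's lowercased form occurred before it, then a comprehension
-- keeps the tokens whose key occurred exactly once before them (alternative decomposition).

-- ===== PORT A =====
def find_duplicate_prompt_tokens (parts : List String) : List String :=
  (parts.foldl
    (fun (st : PySem.Set String × List String × PySem.Set String) part =>
      let key := PySem.Str.lower part
      if PySem.Set.contains st.1 key && !(PySem.Set.contains st.2.2 key) then
        (st.1, st.2.1 ++ [part], PySem.Set.add st.2.2 key)
      else
        (PySem.Set.add st.1 key, st.2.1, st.2.2))
    (PySem.Set.empty, [], PySem.Set.empty)).2.1

-- ===== PORT B =====
def find_duplicate_prompt_tokens_alt (parts : List String) : List String :=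
  ((parts.zip
      ((parts.map PySem.Str.lower).foldl
        (fun (st : List Int × PySem.Dict String Int) k =>
          (st.1 ++ [PySem.Dict.getD st.2 k 0],
           PySem.Dict.insert st.2 k (PySem.Dict.getD st.2 k 0 + 1)))
        ([], PySem.Dict.empty)).1).filter (fun pc => pc.2 == 1)).map (·.1)

-- ===== PRECONDITION & SPEC =====
def Spec_find_duplicate_prompt_tokens (parts : List String) (out : List String) : Prop := out = find_duplicate_prompt_tokens_alt parts
instance (parts : List String) (out : List String) : Decidable (Spec_find_duplicate_prompt_tokens parts out) := by unfold Spec_find_duplicate_prompt_tokens; infer_instance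

-- ===== CLAIM (what is proved, stated in full; the proofs are below) =====
def Claim_equal_find_duplicate_prompt_tokens : Prop := ∀ (parts : List String), Dom_find_duplicate_prompt_tokens parts → Spec_find_duplicate_prompt_tokens parts (find_duplicate_prompt_tokens parts)

-- ===== LEMMAS AND PROOFS =====

-- Proof-side characterisation: the tokens whose key occurs exactly once among the earlier tokens.
def dupSpec (parts : List String) : List String :=
  ((PySem.List.enumerate parts).filter (fun ip =>
      ((PySem.List.slice parts none (some ip.1)).map PySem.Str.lower).count
        (PySem.Str.lower ip.2) == 1)).map (·.2)

-- B on a list extended by one element: the new element is kept iff its key occurred exactly once before it.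
lemma alt_append (pre : List String) (p : String) :
    dupSpec (pre ++ [p]) =
      dupSpec pre ++
        (if (pre.map PySem.Str.lower).count (PySem.Str.lower p) = 1 then [p] else []) := by
  unfold dupSpec
  rw [PySem.List.enumerate_append, List.filter_append, List.map_append]
  congr 1
  · congr 1
    apply List.filter_congr
    intro ip hip
    rw [PySem.List.mem_enumerate_iff] at hip
    obtain ⟨k, hk, rfl⟩ := hip
    simp only [zero_add]
    rw [PySem.List.slice_to_natCast, PySem.List.slice_to_natCast,
        List.take_append_of_le_length (by omega)]
  · simp only [PySem.List.enumerate_cons, PySem.List.enumerate_nil, zero_add]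
    rw [List.filter_cons]
    rw [PySem.List.slice_to_natCast, List.take_left]
    by_cases h : (pre.map PySem.Str.lower).count (PySem.Str.lower p) = 1
    · simp [h]
    · simp [h]

-- The keys of B's output are exactly the keys occurring at least twice.
lemma mem_map_lower_alt (pre : List String) (k : String) :
    k ∈ (dupSpec pre).map PySem.Str.lower ↔
      2 ≤ (pre.map PySem.Str.lower).count k := by
  induction pre using List.reverseRecOn with
  | nil => simp [dupSpec]
  | append_singleton pre p ih =>
    rw [alt_append, List.map_append, List.mem_append, List.map_append,
        List.count_append]
    by_cases hk : k = PySem.Str.lower p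
    · subst hk
      by_cases h : (pre.map PySem.Str.lower).count (PySem.Str.lower p) = 1
      · simp [h, ih]
      · simp only [h, if_false, List.map_nil, List.not_mem_nil, or_false, ih,
          List.map_cons, List.count_singleton, beq_self_eq_true, if_true]
        omega
    · have hc : (List.count k [PySem.Str.lower p]) = 0 :=
        List.count_eq_zero.mpr (by simp [hk])
      by_cases h : (pre.map PySem.Str.lower).count (PySem.Str.lower p) = 1 <;>
        simp [h, ih, hk, hc, List.map_cons]

-- Loop invariant for A's fold: seen = set of processed keys, duplicates = B on the processed
-- prefix, dup_seen = the keys of those duplicates.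
lemma foldA_inv (parts : List String) :
    parts.foldl
      (fun (st : PySem.Set String × List String × PySem.Set String) part =>
        let key := PySem.Str.lower part
        if PySem.Set.contains st.1 key && !(PySem.Set.contains st.2.2 key) then
          (st.1, st.2.1 ++ [part], PySem.Set.add st.2.2 key)
        else
          (PySem.Set.add st.1 key, st.2.1, st.2.2))
      (PySem.Set.empty, [], PySem.Set.empty)
    = (PySem.Set.ofList (parts.map PySem.Str.lower),
       dupSpec parts,
       (dupSpec parts).map PySem.Str.lower) := by
  induction parts using List.reverseRecOn with
  | nil => rfl
  | append_singleton pre p ih =>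
    rw [List.foldl_append, ih, List.foldl_cons, List.foldl_nil, alt_append]
    simp only []
    set key := PySem.Str.lower p with hkey
    by_cases hseen : key ∈ pre.map PySem.Str.lower
    · by_cases hdup : 2 ≤ (pre.map PySem.Str.lower).count key
      · -- already recorded as a duplicate: else branch, seen.add is a no-op
        have hc1 : PySem.Set.contains (PySem.Set.ofList (pre.map PySem.Str.lower)) key = true := by
          rw [PySem.Set.contains_iff, PySem.Set.mem_ofList]; exact hseen
        have hc2 : PySem.Set.contains ((dupSpec pre).map PySem.Str.lower) key = true := by
          rw [PySem.Set.contains_iff, mem_map_lower_alt]; exact hdup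
        have hne : (pre.map PySem.Str.lower).count key ≠ 1 := by omega
        rw [hc1, hc2]
        have h1 : (pre ++ [p]).map PySem.Str.lower = pre.map PySem.Str.lower ++ [key] := by
          simp [hkey]
        simp only [Bool.not_true, Bool.and_false, Bool.false_eq_true, if_false, hne,
          List.append_nil, h1, PySem.Set.ofList_append_singleton]
      · -- second occurrence: the then branch fires
        have hc1 : PySem.Set.contains (PySem.Set.ofList (pre.map PySem.Str.lower)) key = true := by
          rw [PySem.Set.contains_iff, PySem.Set.mem_ofList]; exact hseen
        have hnd : key ∉ (dupSpec pre).map PySem.Str.lower := by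
          rw [mem_map_lower_alt]; exact hdup
        have hc2 : PySem.Set.contains ((dupSpec pre).map PySem.Str.lower) key = false := by
          rw [← Bool.not_eq_true, PySem.Set.contains_iff]; exact hnd
        have hone : (pre.map PySem.Str.lower).count key = 1 := by
          have := List.count_pos_iff.mpr hseen; omega
        rw [hc1, hc2]
        simp only [Bool.not_false, Bool.and_true, hone, if_pos,
          List.map_append, List.map_cons, List.map_nil,
          PySem.Set.add_of_not_mem hnd]
        refine Prod.ext ?_ rfl
        rw [PySem.Set.ofList_append_singleton,
          PySem.Set.add_of_mem ((PySem.Set.mem_ofList _ _).mpr hseen)]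
    · -- first occurrence: else branch
      have hc1 : PySem.Set.contains (PySem.Set.ofList (pre.map PySem.Str.lower)) key = false := by
        rw [← Bool.not_eq_true, PySem.Set.contains_iff, PySem.Set.mem_ofList]; exact hseen
      have hne : (pre.map PySem.Str.lower).count key ≠ 1 := by
        rw [List.count_eq_zero_of_not_mem hseen]; omega
      have h1 : (pre ++ [p]).map PySem.Str.lower = pre.map PySem.Str.lower ++ [key] := by
        simp [hkey]
      rw [hc1]
      simp only [Bool.false_and, Bool.false_eq_true, if_false, hne,
        List.append_nil, h1, PySem.Set.ofList_append_singleton]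


def prefC (base : List String) : List String → List Int
  | [] => []
  | k :: ks => ((base.count k : Int)) :: prefC (base ++ [k]) ks

lemma prefC_length (base ks : List String) : (prefC base ks).length = ks.length := by
  induction ks generalizing base with
  | nil => rfl
  | cons k ks ih => simp [prefC, ih]

lemma prefC_append (base ks : List String) (k : String) :
    prefC base (ks ++ [k]) = prefC base ks ++ [((base ++ ks).count k : Int)] := by
  induction ks generalizing base with
  | nil => simp [prefC]
  | cons k' ks ih => simp [prefC, ih, List.append_assoc]

lemma fold_inv (keys : List String) (acc : List Int) (d : PySem.Dict String Int)
    (base : List String) (hd : ∀ k, PySem.Dict.getD d k 0 = (base.count k : Int)) :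
    (keys.foldl
      (fun (st : List Int × PySem.Dict String Int) k =>
        (st.1 ++ [PySem.Dict.getD st.2 k 0],
         PySem.Dict.insert st.2 k (PySem.Dict.getD st.2 k 0 + 1)))
      (acc, d)).1 = acc ++ prefC base keys := by
  induction keys generalizing acc d base with
  | nil => simp [prefC]
  | cons k ks ih =>
    rw [List.foldl_cons]
    have hstep : ∀ k', PySem.Dict.getD (PySem.Dict.insert d k (PySem.Dict.getD d k 0 + 1)) k' 0
        = ((base ++ [k]).count k' : Int) := by
      intro k'
      rw [PySem.Dict.getD_insert]
      by_cases hkk : k' = k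
      · subst hkk
        simp [hd, List.count_append]
      · have h0 : List.count k' [k] = 0 := List.count_eq_zero.mpr (by simp [hkk])
        simp [hkk, hd, List.count_append, h0]
    rw [ih _ _ _ hstep, hd]
    simp [prefC]

lemma alt_eq_spec (parts : List String) :
    find_duplicate_prompt_tokens_alt parts = dupSpec parts := by
  induction parts using List.reverseRecOn with
  | nil => rfl
  | append_singleton pre p ih =>
    unfold find_duplicate_prompt_tokens_alt at ih ⊢
    rw [fold_inv _ _ _ [] (fun k => rfl), List.nil_append] at ih ⊢
    rw [List.map_append, List.map_cons, List.map_nil, prefC_append, List.nil_append,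
        alt_append]
    rw [List.zip_append (by rw [prefC_length]; simp), List.filter_append, List.map_append, ih]
    congr 1
    simp only [List.zip_cons_cons, List.zip_nil_right, List.filter_cons]
    by_cases h : (pre.map PySem.Str.lower).count (PySem.Str.lower p) = 1
    · rw [h]; simp
    · have h2 : ¬ (((pre.map PySem.Str.lower).count (PySem.Str.lower p) : Int) = 1) := by
        exact_mod_cast fun hh => h (by exact_mod_cast hh)
      simp [h, h2]

-- ===== VERDICT (by name: the statement is the Claim_ definition above) =====
theorem find_duplicate_prompt_tokens_spec : Claim_equal_find_duplicate_prompt_tokens := by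
  intro parts _
  unfold Spec_find_duplicate_prompt_tokens find_duplicate_prompt_tokens
  rw [foldA_inv]
  exact (alt_eq_spec parts).symm
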